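-- pv_equiv track=rewrite | github.com/Lyngsoe/AutomaticQueryReformulation | data_prep/lsh2.py | delete_para_from_annotations
-- ===== SOURCE A (Python) =====
-- import copy
--
-- def delete_para_from_annotations(paras_to_delete, annotations):
--     new_annotations = {}
--     for wiki,paras in annotations.items():
--         for p in paras_to_delete:
--             for para_id in paras:
--                 delete_id = p[1]
--                 if para_id == delete_id:
--                     new_paras = copy.deepcopy(paras)
--                     new_paras.remove(para_id)
--                     new_paras.append(p[0])
--                     paras=new_paras
--             new_annotations.update({wiki: paras})
--
--     return new_annotations
-- ===== SOURCE B (Python) =====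
-- def delete_para_from_annotations(paras_to_delete, annotations):
--     new_annotations = {}
--     for wiki, paras in annotations.items():
--         cur = paras
--         for repl, delete_id in paras_to_delete:
--             k = cur.count(delete_id)
--             if k:
--                 cur = [x for x in cur if x != delete_id] + [repl] * k
--         new_annotations[wiki] = cur
--     return new_annotations
-- ===== Notes on version B (the rewrite author's own statement) =====
-- stated objective: faster
-- what changed: Per wiki, B does one count+filter pass per deletion pair and one dict write, instead of A's rescans with a deepcopy, a remove and an append per matching paragraph id and a dict update per deletion pair.
-- intended difference: When paras_to_delete is empty and annotations is nonempty, A returns {} because it only writes a wiki's entry inside the loop over deletions, while B returns the annotations unchanged, which is the intended no-op. — e.g. on delete_para_from_annotations([], [("w", ["p"])]): A returns [], B returns [("w", ["p"])]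
import Mathlib
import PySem

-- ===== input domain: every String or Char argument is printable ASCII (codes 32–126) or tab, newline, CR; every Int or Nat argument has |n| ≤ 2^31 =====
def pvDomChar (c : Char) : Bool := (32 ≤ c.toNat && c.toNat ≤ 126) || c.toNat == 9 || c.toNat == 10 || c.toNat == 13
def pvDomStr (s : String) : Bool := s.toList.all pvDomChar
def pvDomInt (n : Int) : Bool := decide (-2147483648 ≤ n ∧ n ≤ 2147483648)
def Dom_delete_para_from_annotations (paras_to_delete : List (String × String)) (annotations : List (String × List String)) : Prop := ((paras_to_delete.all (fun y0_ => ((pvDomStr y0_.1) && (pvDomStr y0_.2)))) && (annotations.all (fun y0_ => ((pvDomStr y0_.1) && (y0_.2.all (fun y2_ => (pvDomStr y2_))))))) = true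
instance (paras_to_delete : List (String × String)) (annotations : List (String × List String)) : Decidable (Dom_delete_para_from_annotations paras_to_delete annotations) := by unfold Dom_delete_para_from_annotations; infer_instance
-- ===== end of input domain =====

-- B replaces A's per-match deepcopy+remove+append rescans by one count+filter pass per deletion
-- and one dict write per wiki (objective: faster); on empty paras_to_delete A drops every wiki
-- (returns {}), B keeps the annotations unchanged — see D_ below.

-- ===== PORT A =====
def delete_para_from_annotations (paras_to_delete : List (String × String)) (annotations : List (String × List String)) : List (String × List String) :=
  (annotations.foldl (fun new_annotations wp =>
      (paras_to_delete.foldl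
        (fun (st : PySem.Dict String (List String) × List String) p =>
          -- for para_id in paras: iterates the snapshot st.2 while 'paras' (cur) is rebound
          let paras' := st.2.foldl (fun cur para_id =>
            if para_id = p.2 then
              -- new_paras = deepcopy(paras); new_paras.remove(para_id); new_paras.append(p[0])
              -- remove? is never none here: para_id comes from the snapshot and is still in cur
              ((PySem.List.remove? cur para_id).getD cur) ++ [p.1]
            else cur) st.2
          (st.1.insert wp.1 paras', paras'))
        (new_annotations, wp.2)).1)
    PySem.Dict.empty).items

-- ===== PORT B =====
def delete_para_from_annotations_alt (paras_to_delete : List (String × String)) (annotations : List (String × List String)) : List (String × List String) :=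
  (annotations.foldl (fun new_annotations wp =>
      new_annotations.insert wp.1
        (paras_to_delete.foldl (fun cur p =>
          let k := cur.count p.2
          if k ≠ 0 then cur.filter (fun x => x ≠ p.2) ++ List.replicate k p.1 else cur) wp.2))
    PySem.Dict.empty).items

-- ===== PRECONDITION & SPEC =====
-- On empty paras_to_delete (and nonempty annotations) A returns {} because its wiki entries are
-- only written inside the deletions loop; B returns the annotations unchanged, which is intended.
def D_delete_para_from_annotations (paras_to_delete : List (String × String)) (annotations : List (String × List String)) : Prop :=
  paras_to_delete = [] ∧ annotations ≠ []
instance (paras_to_delete : List (String × String)) (annotations : List (String × List String)) : Decidable (D_delete_para_from_annotations paras_to_delete annotations) := by unfold D_delete_para_from_annotations; infer_instance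

def Spec_delete_para_from_annotations (paras_to_delete : List (String × String)) (annotations : List (String × List String)) (out : List (String × List String)) : Prop := ¬ D_delete_para_from_annotations paras_to_delete annotations → out = delete_para_from_annotations_alt paras_to_delete annotations
instance (paras_to_delete : List (String × String)) (annotations : List (String × List String)) (out : List (String × List String)) : Decidable (Spec_delete_para_from_annotations paras_to_delete annotations out) := by unfold Spec_delete_para_from_annotations; infer_instance

def pvDiffWitness_delete_para_from_annotations : (List (String × String)) × (List (String × List String)) := ([], [("w", ["p"])])
def pvDiffWitnessOut_delete_para_from_annotations : (List (String × List String)) × (List (String × List String)) := ([], [("w", ["p"])])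

-- ===== CLAIM (what is proved, stated in full; the proofs are below) =====
def Claim_unchanged_delete_para_from_annotations : Prop := ∀ (paras_to_delete : List (String × String)) (annotations : List (String × List String)), Dom_delete_para_from_annotations paras_to_delete annotations → Spec_delete_para_from_annotations paras_to_delete annotations (delete_para_from_annotations paras_to_delete annotations)
def Claim_changed_delete_para_from_annotations : Prop := Dom_delete_para_from_annotations (pvDiffWitness_delete_para_from_annotations.1) (pvDiffWitness_delete_para_from_annotations.2) ∧ D_delete_para_from_annotations (pvDiffWitness_delete_para_from_annotations.1) (pvDiffWitness_delete_para_from_annotations.2) ∧ delete_para_from_annotations (pvDiffWitness_delete_para_from_annotations.1) (pvDiffWitness_delete_para_from_annotations.2) = pvDiffWitnessOut_delete_para_from_annotations.1 ∧ delete_para_from_annotations_alt (pvDiffWitness_delete_para_from_annotations.1) (pvDiffWitness_delete_para_from_annotations.2) = pvDiffWitnessOut_delete_para_from_annotations.2 ∧ pvDiffWitnessOut_delete_para_from_annotations.1 ≠ pvDiffWitnessOut_delete_para_from_annotations.2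
def Claim_exact_delete_para_from_annotations : Prop := ∀ (paras_to_delete : List (String × String)) (annotations : List (String × List String)), Dom_delete_para_from_annotations paras_to_delete annotations → D_delete_para_from_annotations paras_to_delete annotations → delete_para_from_annotations paras_to_delete annotations ≠ delete_para_from_annotations_alt paras_to_delete annotations

-- ===== LEMMAS AND PROOFS =====

theorem pv_remove_append {d : String} (pre l : List String) (hpre : ∀ x ∈ pre, x ≠ d) :
    PySem.List.remove? (pre ++ d :: l) d = some (pre ++ l) := by
  induction pre with
  | nil => simp
  | cons a pre ih =>
    have ha : a ≠ d := hpre a (by simp)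
    rw [List.cons_append, PySem.List.remove?_cons_of_ne _ ha,
        ih (fun x hx => hpre x (by simp [hx]))]
    rfl

theorem pv_dict_ext {κ ν : Type} [BEq κ] {a b : PySem.Dict κ ν} (h : a.items = b.items) : a = b := by
  cases a; cases b; simpa using h

theorem pv_insert_insert {κ ν : Type} [BEq κ] [LawfulBEq κ] (d : PySem.Dict κ ν) (k : κ) (v w : ν) :
    (d.insert k v).insert k w = d.insert k w := by
  have h1 : ((d.insert k v).insert k w).items = (d.insert k w).items := by
    rw [PySem.Dict.items_insert_of_contains _ _ (PySem.Dict.contains_insert_self d k v)]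
    by_cases hc : d.contains k = true
    · rw [PySem.Dict.items_insert_of_contains _ _ hc, PySem.Dict.items_insert_of_contains _ _ hc,
          List.map_map]
      apply List.map_congr_left
      intro p _
      by_cases hp : (p.1 == k) = true <;> simp [hp]
    · have hc' : d.contains k = false := by simpa using hc
      rw [PySem.Dict.items_insert_of_not_contains _ _ hc', PySem.Dict.items_insert_of_not_contains _ _ hc']
      rw [List.map_append]
      simp only [List.map_cons, List.map_nil, beq_self_eq_true, if_true]
      refine congrArg (fun l => l ++ [(k, w)]) ?_
      conv_rhs => rw [← List.map_id d.items]
      apply List.map_congr_left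
      intro p hp
      by_cases h : (p.1 == k) = true
      · exfalso
        have : k ∈ d.keys := by
          have := PySem.Dict.mem_keys_of_mem_items (p := p) (d := d) hp
          simpa [eq_of_beq h] using this
        rw [← PySem.Dict.contains_iff_mem_keys] at this
        simp [this] at hc'
      · simp [h, id]
  exact pv_dict_ext h1

def pvStep (cur : List String) (p : String × String) : List String :=
  cur.filter (fun x => x ≠ p.2) ++ List.replicate (cur.count p.2) p.1

theorem pv_innerA (d r : String) :
    ∀ (t pre : List String) (k : Nat), (∀ x ∈ pre, x ≠ d) →
      t.foldl (fun cur para_id =>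
          if para_id = d then ((PySem.List.remove? cur para_id).getD cur) ++ [r] else cur)
        (pre ++ t ++ List.replicate k r)
      = pre ++ t.filter (fun x => x ≠ d) ++ List.replicate (k + t.count d) r := by
  intro t
  induction t with
  | nil => intro pre k h; simp
  | cons x rest ih =>
    intro pre k h
    by_cases hx : x = d
    · subst hx
      rw [List.foldl_cons, if_pos rfl]
      have hrm : PySem.List.remove? (pre ++ x :: rest ++ List.replicate k r) x
          = some (pre ++ (rest ++ List.replicate k r)) := by
        have := pv_remove_append (d := x) pre (rest ++ List.replicate k r) h
        simpa using this
      rw [hrm, Option.getD_some]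
      have hsh : pre ++ (rest ++ List.replicate k r) ++ [r]
          = pre ++ rest ++ List.replicate (k + 1) r := by
        simp [List.replicate_succ', List.append_assoc]
      rw [hsh, ih pre (k + 1) h]
      have : k + 1 + List.count x rest = k + List.count x (x :: rest) := by
        simp [List.count_cons (b := x)]; omega
      rw [this]
      simp
    · rw [List.foldl_cons, if_neg hx]
      have hpre' : ∀ y ∈ pre ++ [x], y ≠ d := by
        intro y hy
        rcases List.mem_append.1 hy with h1 | h1
        · exact h y h1
        · rw [List.mem_singleton.1 h1]; exact hx
      have hshape : pre ++ x :: rest ++ List.replicate k r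
          = (pre ++ [x]) ++ rest ++ List.replicate k r := by simp
      rw [hshape, ih (pre ++ [x]) k hpre']
      simp [hx, List.append_assoc]

theorem pv_innerA_closed (paras : List String) (p : String × String) :
    paras.foldl (fun cur para_id =>
        if para_id = p.2 then ((PySem.List.remove? cur para_id).getD cur) ++ [p.1] else cur)
      paras = pvStep paras p := by
  have := pv_innerA p.2 p.1 paras [] 0 (by intro x hx; simp at hx)
  simpa [pvStep] using this

theorem pv_innerB_closed (cur : List String) (p : String × String) :
    (let k := cur.count p.2
     if k ≠ 0 then cur.filter (fun x => x ≠ p.2) ++ List.replicate k p.1 else cur) = pvStep cur p := by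
  by_cases h : cur.count p.2 = 0
  · have hnot : p.2 ∉ cur := by simpa using (List.count_eq_zero.1 h)
    have hf : cur.filter (fun x => !decide (x = p.2)) = cur := by
      apply List.filter_eq_self.2
      intro x hx
      simp only [Bool.not_eq_eq_eq_not, Bool.not_true, decide_eq_false_iff_not]
      intro hxe; exact hnot (hxe ▸ hx)
    simp only [pvStep, h, List.replicate_zero, List.append_nil, ne_eq]
    rw [if_neg (by simp)]
    rw [show (fun x => decide ¬x = p.2) = (fun x => !decide (x = p.2)) from by funext x; simp]
    exact hf.symm
  · simp [pvStep, h]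

theorem pv_outerA (wiki : String) :
    ∀ (ps : List (String × String)) (p : String × String)
      (d : PySem.Dict String (List String)) (c : List String),
      ((p :: ps).foldl (fun st q => (st.1.insert wiki (pvStep st.2 q), pvStep st.2 q)) (d, c)).1
        = d.insert wiki ((p :: ps).foldl pvStep c) := by
  intro ps
  induction ps with
  | nil => intro p d c; simp
  | cons q ps ih =>
    intro p d c
    rw [List.foldl_cons, List.foldl_cons (f := pvStep)]
    have := ih q (d.insert wiki (pvStep c p)) (pvStep c p)
    rw [List.foldl_cons] at this ⊢
    rw [this, pv_insert_insert]

theorem pv_portA_eq (p : String × String) (ps : List (String × String)) (anns : List (String × List String)) :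
    delete_para_from_annotations (p :: ps) anns =
      (anns.foldl (fun d wp => d.insert wp.1 ((p :: ps).foldl pvStep wp.2)) PySem.Dict.empty).items := by
  unfold delete_para_from_annotations
  congr 1
  apply congrArg (fun f => List.foldl f PySem.Dict.empty anns)
  funext na wp
  have h1 : (fun (st : PySem.Dict String (List String) × List String) (q : String × String) =>
      let paras' := st.2.foldl (fun cur para_id =>
        if para_id = q.2 then ((PySem.List.remove? cur para_id).getD cur) ++ [q.1] else cur) st.2
      (st.1.insert wp.1 paras', paras'))
      = (fun st q => (st.1.insert wp.1 (pvStep st.2 q), pvStep st.2 q)) := by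
    funext st q
    simp only [pv_innerA_closed]
  rw [h1, pv_outerA]

theorem pv_portB_eq (ps : List (String × String)) (anns : List (String × List String)) :
    delete_para_from_annotations_alt ps anns =
      (anns.foldl (fun d wp => d.insert wp.1 (ps.foldl pvStep wp.2)) PySem.Dict.empty).items := by
  unfold delete_para_from_annotations_alt
  congr 1
  apply congrArg (fun f => List.foldl f PySem.Dict.empty anns)
  funext na wp
  have h1 : (fun (cur : List String) (q : String × String) =>
      let k := cur.count q.2
      if k ≠ 0 then cur.filter (fun x => x ≠ q.2) ++ List.replicate k q.1 else cur) = pvStep := by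
    funext cur q
    exact pv_innerB_closed cur q
  rw [h1]

theorem pv_insert_items_ne_nil (d : PySem.Dict String (List String)) (k : String) (v : List String) :
    (d.insert k v).items ≠ [] := by
  cases d with
  | mk l =>
    cases l with
    | nil => simp [PySem.Dict.insert, PySem.Dict.contains]
    | cons a t =>
      by_cases hc : (PySem.Dict.mk (a :: t)).contains k = true
      · rw [PySem.Dict.items_insert_of_contains _ _ hc]; simp
      · rw [PySem.Dict.items_insert_of_not_contains _ _ (by simp only [Bool.not_eq_true] at hc; exact hc)]; simp

theorem pv_foldl_insert_items_ne_nil (f : String × List String → List String) :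
    ∀ (l : List (String × List String)) (d : PySem.Dict String (List String)),
      (d.items ≠ [] ∨ l ≠ []) →
      (l.foldl (fun d wp => d.insert wp.1 (f wp)) d).items ≠ [] := by
  intro l
  induction l with
  | nil =>
    intro d h
    rcases h with h | h
    · simpa using h
    · exact absurd rfl h
  | cons a rest ih =>
    intro d _
    rw [List.foldl_cons]
    exact ih (d.insert a.1 (f a)) (Or.inl (pv_insert_items_ne_nil d a.1 (f a)))

theorem pv_A_nil (anns : List (String × List String)) :
    delete_para_from_annotations [] anns = [] := by
  unfold delete_para_from_annotations
  have : anns.foldl (fun (na : PySem.Dict String (List String)) (wp : String × List String) =>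
      (([] : List (String × String)).foldl
        (fun (st : PySem.Dict String (List String) × List String) p =>
          let paras' := st.2.foldl (fun cur para_id =>
            if para_id = p.2 then ((PySem.List.remove? cur para_id).getD cur) ++ [p.1] else cur) st.2
          (st.1.insert wp.1 paras', paras'))
        (na, wp.2)).1) PySem.Dict.empty = PySem.Dict.empty := by
    induction anns with
    | nil => rfl
    | cons a rest ih => simp only [List.foldl_cons, List.foldl_nil]; exact ih
  rw [this]
  rfl

-- ===== VERDICT (by name: the statement is the Claim_ definition above) =====
theorem delete_para_from_annotations_spec : Claim_unchanged_delete_para_from_annotations := by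
  intro ps anns _
  unfold Spec_delete_para_from_annotations
  intro hnd
  by_cases hps : ps = []
  · subst hps
    have hann : anns = [] := by
      by_contra h
      exact hnd ⟨rfl, h⟩
    subst hann
    rfl
  · obtain ⟨p, ps', rfl⟩ := List.exists_cons_of_ne_nil hps
    rw [pv_portA_eq, pv_portB_eq]

theorem delete_para_from_annotations_changed : Claim_changed_delete_para_from_annotations := by
  unfold Claim_changed_delete_para_from_annotations; decide

theorem delete_para_from_annotations_tight : Claim_exact_delete_para_from_annotations := by
  intro ps anns _ hD
  obtain ⟨rfl, hann⟩ := hD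
  rw [pv_A_nil, pv_portB_eq]
  intro h
  exact pv_foldl_insert_items_ne_nil _ anns PySem.Dict.empty (Or.inr hann) h.symm
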